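-- pv_equiv track=rewrite | github.com/shuligraph/matching-paradox-numeric | simulator.py | all_independent_sets
-- ===== SOURCE A (Python) =====
-- from itertools import combinations, permutations
--
-- def is_independent_set(adj, nodes):
--     # Check if no edge exists between any pair in the subset
--     return all(v not in adj[u] for u, v in combinations(nodes, 2))
--
-- def all_independent_sets(adj):
--     nodes = list(adj.keys())
--     result = []
--     for r in range(1, len(nodes) + 1):
--         for subset in combinations(nodes, r):
--             if is_independent_set(adj, subset):
--                 result.append(set(subset))
--     return result
-- ===== SOURCE B (Python) =====
-- def all_independent_sets(adj):
--     nodes = list(adj.keys())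
--     n = len(nodes)
--     nbr = {u: set(vs) for u, vs in adj.items()}
--     found = []
--     def extend(start, cur, banned):
--         for i in range(start, n):
--             v = nodes[i]
--             if v not in banned:
--                 s = cur + [v]
--                 found.append(s)
--                 extend(i + 1, s, banned | nbr[v])
--     extend(0, [], set())
--     return [set(s) for r in range(1, n + 1) for s in found if len(s) == r]
-- ===== Notes on version B (the rewrite author's own statement) =====
-- stated objective: alternative
-- what changed: Instead of enumerating every r-subset for each r and running a pairwise edge test on each, B does one DFS that only extends already-independent sets, carrying the set of banned nodes (neighbours of chosen nodes) for an O(1) extension test, then emits the found sets grouped by size to restore A's (size, lexicographic) order; intended as faster (it skips all non-independent subsets), but a timing run could not confirm >=1.5x (measured 1.28x at n=16, both time out on larger exponential outputs).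
import Mathlib
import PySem

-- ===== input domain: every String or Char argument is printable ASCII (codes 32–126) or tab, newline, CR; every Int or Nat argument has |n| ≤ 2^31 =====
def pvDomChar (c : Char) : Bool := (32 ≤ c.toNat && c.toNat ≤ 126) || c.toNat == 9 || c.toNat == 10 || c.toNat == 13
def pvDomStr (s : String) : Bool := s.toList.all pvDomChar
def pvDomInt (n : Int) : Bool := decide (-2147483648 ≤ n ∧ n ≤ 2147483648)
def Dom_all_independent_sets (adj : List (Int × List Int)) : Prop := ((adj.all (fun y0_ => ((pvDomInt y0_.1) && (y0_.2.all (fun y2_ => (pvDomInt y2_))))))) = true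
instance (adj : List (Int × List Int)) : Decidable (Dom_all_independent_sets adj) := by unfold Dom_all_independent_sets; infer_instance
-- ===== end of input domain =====

-- B replaces A's enumerate-every-subset-then-test loops by one pruning DFS that carries the
-- set of banned nodes (neighbours of the chosen ones), grouped by size afterwards.

-- ===== PORT A =====
-- adj[u] (u is always a key of adj when this is reached, so no KeyError)
def pvAdjGet (adj : List (Int × List Int)) (u : Int) : List Int := (adj.lookup u).getD []

-- itertools.combinations over a list, lexicographic order of positions
def pvCombos (ns : List Int) (r : Nat) : List (List Int) :=
  match ns, r with
  | _, 0 => [[]]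
  | [], _ + 1 => []
  | x :: xs, r + 1 => (pvCombos xs r).map (x :: ·) ++ pvCombos xs (r + 1)

def is_independent_set (adj : List (Int × List Int)) (s : List Int) : Bool :=
  (pvCombos s 2).all (fun p =>
    match p with
    | u :: v :: _ => !((pvAdjGet adj u).contains v)
    | _ => true)

def all_independent_sets (adj : List (Int × List Int)) : List (List Int) :=
  let nodes := PySem.List.dedup (adj.map Prod.fst)
  (PySem.List.pyRange 1 ((nodes.length : Int) + 1) 1).foldl
    (fun result r =>
      (pvCombos nodes r.natAbs).foldl
        (fun result subset =>
          if is_independent_set adj subset then result ++ [PySem.Set.ofList subset] else result)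
        result)
    []

-- ===== PORT B =====
-- nbr = {u: set(vs) for u, vs in adj.items()} looked up at u (first match, as for adj[u])
def pvNbr (adj : List (Int × List Int)) (u : Int) : PySem.Set Int :=
  PySem.Set.ofList ((adj.lookup u).getD [])

-- B's `extend(start, cur, banned)`: the loop over nodes[start:] becomes structural recursion on that suffix
def pvExtend (adj : List (Int × List Int)) : List Int → List Int → PySem.Set Int → List (List Int)
  | [], _, _ => []
  | v :: rest, cur, banned =>
    if !(PySem.Set.contains banned v) then
      (cur ++ [v]) :: pvExtend adj rest (cur ++ [v]) (PySem.Set.union banned (pvNbr adj v))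
        ++ pvExtend adj rest cur banned
    else pvExtend adj rest cur banned

def all_independent_sets_alt (adj : List (Int × List Int)) : List (List Int) :=
  let nodes := PySem.List.dedup (adj.map Prod.fst)
  let found := pvExtend adj nodes [] PySem.Set.empty
  (PySem.List.pyRange 1 ((nodes.length : Int) + 1) 1).foldl
    (fun out r => out ++ (found.filter (fun s => (s.length : Int) == r)).map PySem.Set.ofList)
    []

-- ===== PRECONDITION & SPEC =====
def Spec_all_independent_sets (adj : List (Int × List Int)) (out : List (List Int)) : Prop := out = all_independent_sets_alt adj
instance (adj : List (Int × List Int)) (out : List (List Int)) : Decidable (Spec_all_independent_sets adj out) := by unfold Spec_all_independent_sets; infer_instance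

-- ===== CLAIM (what is proved, stated in full; the proofs are below) =====
def Claim_equal_all_independent_sets : Prop := ∀ (adj : List (Int × List Int)), Dom_all_independent_sets adj → Spec_all_independent_sets adj (all_independent_sets adj)

-- ===== LEMMAS AND PROOFS =====

-- incremental independence of an extension t grown from cur (what B's DFS checks)
def pvChainOk (adj : List (Int × List Int)) : List Int → List Int → Bool
  | _, [] => true
  | cur, v :: t =>
    cur.all (fun u => !((pvAdjGet adj u).contains v)) && pvChainOk adj (cur ++ [v]) t

-- pairwise independence, head against tail (what A's pairwise test amounts to)
def pvPairAll (adj : List (Int × List Int)) : List Int → Bool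
  | [] => true
  | x :: xs => xs.all (fun v => !((pvAdjGet adj x).contains v)) && pvPairAll adj xs

theorem pvCombos_one (ns : List Int) : pvCombos ns 1 = ns.map (fun x => [x]) := by
  induction ns with
  | nil => rfl
  | cons x xs ih => simp [pvCombos, ih]

theorem pvIndep_eq_pairAll (adj : List (Int × List Int)) (s : List Int) :
    is_independent_set adj s = pvPairAll adj s := by
  induction s with
  | nil => rfl
  | cons x xs ih =>
    simp only [is_independent_set, pvCombos, pvCombos_one, List.all_append, List.all_map,
      pvPairAll]
    congr 1

theorem pvChainOk_eq (adj : List (Int × List Int)) (t : List Int) :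
    ∀ cur, pvChainOk adj cur t
      = (t.all (fun v => cur.all (fun u => !((pvAdjGet adj u).contains v))) && pvPairAll adj t) := by
  induction t with
  | nil => intro cur; simp [pvChainOk, pvPairAll]
  | cons v t ih =>
    intro cur
    simp only [pvChainOk, pvPairAll, ih, List.all_append, List.all_cons]
    rw [Bool.eq_iff_iff]
    simp only [Bool.and_eq_true, List.all_eq_true]
    constructor
    · rintro ⟨h1, h2, h3⟩
      exact ⟨⟨h1, fun x hx => (h2 x hx).1⟩, fun x hx => (h2 x hx).2.1, h3⟩
    · rintro ⟨⟨h1, h2⟩, h3, h4⟩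
      exact ⟨h1, fun x hx => ⟨h2 x hx, h3 x hx, by simp⟩, h4⟩

theorem pvExtend_len (adj : List (Int × List Int)) (ns : List Int) :
    ∀ cur banned l, l ∈ pvExtend adj ns cur banned → cur.length < l.length := by
  induction ns with
  | nil => intro cur banned l h; simp [pvExtend] at h
  | cons v rest ih =>
    intro cur banned l h
    simp only [pvExtend] at h
    split at h
    · rcases List.mem_append.mp h with h | h
      · rcases List.mem_cons.mp h with rfl | h
        · simp
        · have := ih _ _ _ h; simp at this; omega
      · exact ih _ _ _ h
    · exact ih _ _ _ h

theorem pvExtend_filter (adj : List (Int × List Int)) (ns : List Int) :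
    ∀ (cur : List Int) (banned : PySem.Set Int) (r : Nat),
      (∀ w : Int, w ∈ banned ↔ ∃ u ∈ cur, w ∈ pvAdjGet adj u) →
      (pvExtend adj ns cur banned).filter (fun l => l.length == cur.length + (r + 1))
        = ((pvCombos ns (r + 1)).filter (pvChainOk adj cur)).map (cur ++ ·) := by
  induction ns with
  | nil => intro cur banned r _; simp [pvExtend, pvCombos]
  | cons v rest ih =>
    intro cur banned r hb
    simp only [pvExtend, pvCombos]
    have hcond : (!(PySem.Set.contains banned v))
        = cur.all (fun u => !((pvAdjGet adj u).contains v)) := by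
      rw [Bool.eq_iff_iff]
      simp [hb v, List.all_eq_true]
    rw [hcond]
    have hb' : ∀ w : Int, w ∈ PySem.Set.union banned (pvNbr adj v)
        ↔ ∃ u ∈ cur ++ [v], w ∈ pvAdjGet adj u := by
      intro w
      simp only [PySem.Set.mem_union, pvNbr, PySem.Set.mem_ofList, hb w, List.mem_append,
        List.mem_singleton]
      constructor
      · rintro (⟨u, hu, hw⟩ | hw)
        · exact ⟨u, Or.inl hu, hw⟩
        · exact ⟨v, Or.inr rfl, hw⟩
      · rintro ⟨u, hu | rfl, hw⟩
        · exact Or.inl ⟨u, hu, hw⟩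
        · exact Or.inr hw
    have hmapgen : ∀ (_ : cur.all (fun u => !((pvAdjGet adj u).contains v)) = true),
        ((pvCombos rest r).map (v :: ·)).filter (pvChainOk adj cur)
          = ((pvCombos rest r).filter (pvChainOk adj (cur ++ [v]))).map (v :: ·) := by
      intro h
      rw [List.filter_map]
      congr 1
      apply List.filter_congr
      intro t _
      simp only [Function.comp_apply, pvChainOk, h, Bool.true_and]
    by_cases hok : cur.all (fun u => !((pvAdjGet adj u).contains v)) = true
    · rw [if_pos hok, List.filter_append, List.filter_append, List.map_append,
        List.filter_cons, hmapgen hok, ih cur banned r hb]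
      congr 1
      cases r with
      | zero =>
        have h0 : (pvExtend adj rest (cur ++ [v]) (PySem.Set.union banned (pvNbr adj v))).filter
            (fun l => l.length == cur.length + (0 + 1)) = [] := by
          apply List.filter_eq_nil_iff.mpr
          intro l hl
          have := pvExtend_len adj rest _ _ _ hl
          simp at this ⊢
          omega
        simp only [pvCombos]
        rw [if_pos (by simp)]
        rw [h0]
        simp [pvChainOk]
      | succ r' =>
        rw [if_neg (by simp)]
        have : (fun l => l.length == cur.length + (r' + 1 + 1))
            = (fun l : List Int => l.length == (cur ++ [v]).length + (r' + 1)) := by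
          funext l; simp; omega
        rw [this, ih (cur ++ [v]) (PySem.Set.union banned (pvNbr adj v)) r' hb', List.map_map]
        congr 1
        funext t
        simp
    · rw [if_neg hok, List.filter_append, List.map_append, ih cur banned r hb]
      have hnil : ((pvCombos rest r).map (v :: ·)).filter (pvChainOk adj cur) = [] := by
        apply List.filter_eq_nil_iff.mpr
        intro t ht
        rcases List.mem_map.mp ht with ⟨t', _, rfl⟩
        simp only [pvChainOk]
        simp only [Bool.and_eq_true] at *
        intro hc
        exact absurd hc.1 hok
      rw [hnil]
      simp

-- the size-r block of B's output equals the size-r block of A's output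
theorem pvBlock_eq (adj : List (Int × List Int)) (nodes : List Int) (k : Nat) :
    (pvExtend adj nodes [] PySem.Set.empty).filter (fun s => s.length == k + 1)
      = (pvCombos nodes (k + 1)).filter (is_independent_set adj) := by
  have h := pvExtend_filter adj nodes [] PySem.Set.empty k (by simp [PySem.Set.empty])
  simp only [List.length_nil, Nat.zero_add] at h
  rw [h]
  have : (fun x => ([] : List Int) ++ x) = id := by funext x; simp
  rw [this, List.map_id]
  apply List.filter_congr
  intro t _
  rw [pvChainOk_eq, pvIndep_eq_pairAll]
  simp

-- ===== VERDICT (by name: the statement is the Claim_ definition above) =====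
theorem all_independent_sets_spec : Claim_equal_all_independent_sets := by
  intro adj _
  unfold Spec_all_independent_sets all_independent_sets all_independent_sets_alt
  apply PySem.List.foldl_congr_mem
  intro acc r hr
  rw [PySem.List.foldl_append_if]
  congr 1
  rcases (PySem.List.mem_pyRange_one).mp hr with ⟨h1, _⟩
  obtain ⟨k, hk⟩ : ∃ k : Nat, r = ((k + 1 : Nat) : Int) := by
    refine ⟨r.toNat - 1, ?_⟩
    omega
  subst hk
  rw [show (((k + 1 : Nat) : Int)).natAbs = k + 1 from rfl]
  have hfil : (pvExtend adj (PySem.List.dedup (adj.map Prod.fst)) [] PySem.Set.empty).filter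
        (fun s => (s.length : Int) == ((k + 1 : Nat) : Int))
      = (pvExtend adj (PySem.List.dedup (adj.map Prod.fst)) [] PySem.Set.empty).filter
        (fun s => s.length == k + 1) := by
    apply List.filter_congr
    intro t _
    rw [Bool.eq_iff_iff]
    simp only [beq_iff_eq]
    omega
  rw [hfil, pvBlock_eq]
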